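-- pv_equiv track=rewrite | github.com/Siegel-Lab/libBioSmoother | python/libContactMapping/evenly_dividible.py | find_high_score
-- ===== SOURCE A (Python) =====
-- def score(p):
--     for x in range(10, 0, -1):
--         if ( p + 1 ) % ( 2**x ) == 0:
--             return x
--     return 0
--
-- def find_high_score(f, t):
--     s = 0
--     x = f
--     for i in range(f, t):
--         if score(i) > s:
--             s = score(i)
--             x = i
--     return x
-- ===== SOURCE B (Python) =====
-- def find_high_score(f, t):
--     # highest capped 2-adic valuation first: smallest multiple of 2**x in [f+1, t]
--     for x in range(10, 0, -1):
--         k = 2 ** x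
--         m = -((-(f + 1)) // k) * k  # smallest multiple of k that is >= f+1
--         if m <= t:
--             return m - 1
--     return f
-- ===== Notes on version B (the rewrite author's own statement) =====
-- stated objective: faster
-- what changed: Instead of scanning every i in range(f, t) and scoring each with a 10-step divisibility loop, B iterates only over the 10 possible score values x = 10..1 and computes arithmetically the smallest multiple of 2**x in [f+1, t], returning at the first (highest) x that has one.
import Mathlib
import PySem

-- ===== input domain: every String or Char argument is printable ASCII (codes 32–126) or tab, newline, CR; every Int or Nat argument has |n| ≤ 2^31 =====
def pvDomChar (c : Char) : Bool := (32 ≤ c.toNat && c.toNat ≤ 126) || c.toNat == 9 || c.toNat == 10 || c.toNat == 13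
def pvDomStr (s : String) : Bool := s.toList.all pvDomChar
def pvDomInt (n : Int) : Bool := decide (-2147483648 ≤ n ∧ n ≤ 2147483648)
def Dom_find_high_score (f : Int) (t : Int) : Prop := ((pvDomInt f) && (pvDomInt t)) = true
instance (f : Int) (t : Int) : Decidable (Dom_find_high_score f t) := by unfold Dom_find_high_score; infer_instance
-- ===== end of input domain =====

-- B replaces A's O(t-f) scan of every i in [f,t) by an O(1)-per-exponent search over the 10
-- possible score values (smallest multiple of 2^x in [f+1,t], highest x first): asymptotically faster.

-- ===== PORT A =====
-- score's loop 'for x in range(10, 0, -1): if (p+1) % 2**x == 0: return x' with early return,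
-- as structural recursion over the range list (x is always positive here, so 2**x = 2 ^ x.toNat).
def scoreLoop (p : Int) : List Int → Int
  | [] => 0
  | x :: rest => if PySem.Int.mod (p + 1) ((2 : Int) ^ x.toNat) == 0 then x else scoreLoop p rest

def score (p : Int) : Int := scoreLoop p (PySem.List.pyRange 10 0 (-1))

-- 'for i in range(f, t)' updating (s, x) when score(i) > s
def find_high_score (f : Int) (t : Int) : Int :=
  ((PySem.List.pyRange f t 1).foldl
      (fun (st : Int × Int) i => if score i > st.1 then (score i, i) else st) (0, f)).2

-- ===== PORT B =====
-- Source B's loop 'for x in range(10, 0, -1): … if m <= t: return m - 1' with early return,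
-- as structural recursion over the range list (x is always positive here, so 2**x = 2 ^ x.toNat).
def bLoop (f t : Int) : List Int → Int
  | [] => f
  | x :: rest =>
      let k : Int := (2 : Int) ^ x.toNat
      let m : Int := -(PySem.Int.floordiv (-(f + 1)) k) * k
      if m ≤ t then m - 1 else bLoop f t rest

def find_high_score_alt (f : Int) (t : Int) : Int := bLoop f t (PySem.List.pyRange 10 0 (-1))

-- ===== PRECONDITION & SPEC =====
def Spec_find_high_score (f : Int) (t : Int) (out : Int) : Prop := out = find_high_score_alt f t
instance (f : Int) (t : Int) (out : Int) : Decidable (Spec_find_high_score f t out) := by unfold Spec_find_high_score; infer_instance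

-- ===== CLAIM (what is proved, stated in full; the proofs are below) =====
def Claim_equal_find_high_score : Prop := ∀ (f : Int) (t : Int), Dom_find_high_score f t → Spec_find_high_score f t (find_high_score f t)

-- ===== LEMMAS AND PROOFS =====

-- the A-side loop step
def stepA (st : Int × Int) (i : Int) : Int × Int := if score i > st.1 then (score i, i) else st

-- maximum of score over range(f, t), floored at 0 (exactly the final s of A's loop)
def Mx (f t : Int) : Int := ((PySem.List.pyRange f t 1).map score).foldl max 0

-- first index of range(f, t) attaining Mx, defaulting to f (A's final x, as proved below)
def Fst (f t : Int) : Int :=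
  (((PySem.List.pyRange f t 1).find? (fun i => score i == Mx f t)).getD f)

lemma rng10 : PySem.List.pyRange 10 0 (-1) = [10,9,8,7,6,5,4,3,2,1] := by decide

lemma score_nonneg (p : Int) : 0 ≤ score p := by
  simp only [score, rng10, scoreLoop]
  split_ifs <;> norm_num

lemma score_le10 (p : Int) : score p ≤ 10 := by
  simp only [score, rng10, scoreLoop]
  split_ifs <;> norm_num

lemma score_dvd (p : Int) : 1 ≤ score p → (2 : Int) ^ (score p).toNat ∣ p + 1 := by
  simp only [score, rng10, scoreLoop, beq_iff_eq, PySem.Int.mod_eq_zero_iff_dvd]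
  norm_num
  split_ifs <;> intro h <;> first | assumption | omega

lemma score_ge (p x : Int) (hx1 : 1 ≤ x) (hx10 : x ≤ 10)
    (hd : (2 : Int) ^ x.toNat ∣ p + 1) : x ≤ score p := by
  have hstep : ∀ z : Nat, (z : Int) ≤ x → (2 : Int) ^ z ∣ p + 1 := by
    intro z hz
    exact dvd_trans (pow_dvd_pow 2 (by omega)) hd
  simp only [score, rng10, scoreLoop, beq_iff_eq, PySem.Int.mod_eq_zero_iff_dvd]
  norm_num
  split_ifs with h10 h9 h8 h7 h6 h5 h4 h3 h2 h1
  · omega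
  · by_contra hc; exact h10 (hstep 10 (by omega))
  · by_contra hc; exact h9 (hstep 9 (by omega))
  · by_contra hc; exact h8 (hstep 8 (by omega))
  · by_contra hc; exact h7 (hstep 7 (by omega))
  · by_contra hc; exact h6 (hstep 6 (by omega))
  · by_contra hc; exact h5 (hstep 5 (by omega))
  · by_contra hc; exact h4 (hstep 4 (by omega))
  · by_contra hc; exact h3 (hstep 3 (by omega))
  · by_contra hc; exact h2 (hstep 2 (by omega))
  · by_contra hc; exact h1 (hstep 1 (by omega))

lemma mx_nil (f t : Int) (h : t ≤ f) : Mx f t = 0 := by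
  unfold Mx; rw [PySem.List.pyRange_one_eq_nil h]; rfl

lemma mx_nonneg (f t : Int) : 0 ≤ Mx f t :=
  (PySem.List.le_foldl_max _ 0).1

lemma score_le_mx (f t i : Int) (h : i ∈ PySem.List.pyRange f t 1) : score i ≤ Mx f t :=
  (PySem.List.le_foldl_max _ 0).2 _ (List.mem_map_of_mem h)

lemma mx_le10 (f t : Int) : Mx f t ≤ 10 := by
  unfold Mx
  rcases PySem.List.foldl_max_mem ((PySem.List.pyRange f t 1).map score) 0 with h | h
  · rw [h]; norm_num
  · rcases List.mem_map.mp h with ⟨i, _, hi⟩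
    rw [← hi]; exact score_le10 i

lemma mx_att (f t : Int) (h : 0 < Mx f t) :
    ∃ i ∈ PySem.List.pyRange f t 1, score i = Mx f t := by
  unfold Mx at h ⊢
  rcases PySem.List.foldl_max_mem ((PySem.List.pyRange f t 1).map score) 0 with h0 | hm
  · exfalso; omega
  · rcases List.mem_map.mp hm with ⟨i, hi, hsc⟩
    exact ⟨i, hi, hsc⟩

lemma mx_succ (f t : Int) (h : f ≤ t) : Mx f (t + 1) = max (Mx f t) (score t) := by
  unfold Mx
  rw [PySem.List.pyRange_one_succ_right h, List.map_append, List.foldl_append]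
  rfl

-- A's fold computes (Mx, Fst)
lemma foldA (f t : Int) :
    (PySem.List.pyRange f t 1).foldl stepA (0, f) = (Mx f t, Fst f t) := by
  rcases (by omega : t ≤ f ∨ f < t) with h | h
  · rw [PySem.List.pyRange_one_eq_nil h, mx_nil f t h]
    unfold Fst
    rw [PySem.List.pyRange_one_eq_nil h]
    rfl
  · obtain ⟨n, rfl⟩ : ∃ n : Nat, t = f + n := ⟨(t - f).toNat, by omega⟩
    clear h
    induction n with
    | zero =>
        simp only [Nat.cast_zero, add_zero]
        rw [PySem.List.pyRange_one_eq_nil (by omega), mx_nil f f (by omega)]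
        unfold Fst
        rw [PySem.List.pyRange_one_eq_nil (by omega)]
        rfl
    | succ n ih =>
        have hle : f ≤ f + (n : Int) := by omega
        have hsplit : f + ((n : Nat) + 1 : Nat) = (f + (n : Int)) + 1 := by push_cast; ring
        rw [hsplit, PySem.List.pyRange_one_succ_right hle, List.foldl_append, ih]
        set b := f + (n : Int) with hb
        have hmx := mx_succ f b hle
        by_cases hgt : score b > Mx f b
        · have hmx' : Mx f (b + 1) = score b := by rw [hmx]; omega
          have hfst : Fst f (b + 1) = b := by
            unfold Fst
            rw [PySem.List.pyRange_one_succ_right hle, List.find?_append]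
            have hnone : (PySem.List.pyRange f b 1).find? (fun i => score i == Mx f (b + 1)) = none := by
              rw [List.find?_eq_none]
              intro i hi
              have := score_le_mx f b i hi
              simp only [beq_iff_eq, hmx']
              omega
            rw [hnone]
            simp [hmx']
          simp only [List.foldl_cons, List.foldl_nil, stepA, if_pos hgt, hmx', hfst]
        · have hmx' : Mx f (b + 1) = Mx f b := by rw [hmx]; omega
          have hfst : Fst f (b + 1) = Fst f b := by
            unfold Fst
            rw [PySem.List.pyRange_one_succ_right hle, List.find?_append, hmx']
            cases hfind : (PySem.List.pyRange f b 1).find? (fun i => score i == Mx f b) with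
            | some a => simp
            | none =>
                have hall : ∀ i ∈ PySem.List.pyRange f b 1, ¬ (score i = Mx f b) := by
                  intro i hi
                  have := List.find?_eq_none.mp hfind i hi
                  simpa using this
                by_cases h0 : Mx f b = 0
                · -- all scores ≤ 0 and ≥ 0, so the range must be empty, hence b = f
                  have hempty : b ≤ f := by
                    by_contra hbf
                    have hbf' : f < b := by omega
                    have hmem : f ∈ PySem.List.pyRange f b 1 := by
                      rw [PySem.List.pyRange_one_cons hbf']; exact List.mem_cons_self
                    have h1 := score_le_mx f b f hmem
                    have h2 := score_nonneg f
                    exact hall f hmem (by omega)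
                  have hbf : b = f := by omega
                  have hscb : score b = 0 := by
                    have := score_nonneg b; omega
                  simp [hbf]
                  split <;> rfl
                · exfalso
                  have hpos : 0 < Mx f b := by have := mx_nonneg f b; omega
                  rcases mx_att f b hpos with ⟨i, hi, hsc⟩
                  exact hall i hi hsc
          simp only [List.foldl_cons, List.foldl_nil, stepA, if_neg hgt, hmx', hfst]

-- ceiling-multiple bounds for B's m
lemma m_bounds (a k : Int) (hk : 0 < k) :
    let m := -(PySem.Int.floordiv (-a) k) * k
    k ∣ m ∧ a ≤ m ∧ m - k < a := by
  intro m
  have h := (PySem.Int.neg_floordiv_neg_eq_iff_of_pos (a := a) (b := k)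
      (q := -(PySem.Int.floordiv (-a) k)) hk).mp rfl
  refine ⟨dvd_mul_left k _, ?_, ?_⟩ <;> nlinarith [h.1, h.2]

-- a strictly smaller multiple of k that is ≥ a cannot exist below m
lemma m_min (a k m i : Int) (_hk : 0 < k) (hdm : k ∣ m) (hma : m - k < a)
    (hdi : k ∣ i) (hia : a ≤ i) : m ≤ i := by
  by_contra hc
  have hdvd : k ∣ m - i := dvd_sub hdm hdi
  have h1 : 0 < m - i := by omega
  have h2 := Int.le_of_dvd h1 hdvd
  omega

-- the list [x, x-1, …, 1] that B's loop walks
def descList : Nat → List Int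
  | 0 => []
  | n + 1 => ((n + 1 : Nat) : Int) :: descList n

lemma rng10_desc : PySem.List.pyRange 10 0 (-1) = descList 10 := by decide

lemma bMain (f t : Int) : ∀ x : Nat, x ≤ 10 → Mx f t ≤ x → bLoop f t (descList x) = Fst f t := by
  intro x
  induction x with
  | zero =>
      intro _ hmx
      have h0 : Mx f t = 0 := by have := mx_nonneg f t; omega
      show f = Fst f t
      unfold Fst
      rcases (by omega : t ≤ f ∨ f < t) with h | h
      · rw [PySem.List.pyRange_one_eq_nil h]; rfl
      · have hmem : f ∈ PySem.List.pyRange f t 1 := by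
          rw [PySem.List.pyRange_one_cons h]; exact List.mem_cons_self
        have hle := score_le_mx f t f hmem
        have hge := score_nonneg f
        have hscf : score f = 0 := by omega
        rw [PySem.List.pyRange_one_cons h]
        simp [hscf, h0]
  | succ x ih =>
      intro hx10 hmx
      show bLoop f t (((x + 1 : Nat) : Int) :: descList x) = Fst f t
      have htn : (((x + 1 : Nat) : Int)).toNat = x + 1 := by omega
      simp only [bLoop, htn]
      set k : Int := (2 : Int) ^ (x + 1) with hkdef
      have hk : 0 < k := by positivity
      set m : Int := -(PySem.Int.floordiv (-(f + 1)) k) * k with hmdef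
      obtain ⟨hdm, hma, hmk⟩ := m_bounds (f + 1) k hk
      by_cases hcond : m ≤ t
      · rw [if_pos hcond]
        -- m - 1 is in range(f, t) and has score x+1, so Mx = x+1 and Fst = m - 1
        have hmem : m - 1 ∈ PySem.List.pyRange f t 1 := by
          rw [PySem.List.mem_pyRange_one]; omega
        have hdvd : (2 : Int) ^ ((x : Int) + 1).toNat ∣ (m - 1) + 1 := by
          have h1 : ((x : Int) + 1).toNat = x + 1 := by omega
          have h2 : m - 1 + 1 = m := by ring
          rw [h1, h2, ← hkdef]
          exact hdm
        have hge : ((x : Int) + 1) ≤ score (m - 1) :=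
          score_ge (m - 1) ((x : Int) + 1) (by omega) (by omega) hdvd
        have hle := score_le_mx f t (m - 1) hmem
        have hmx' : Mx f t = (x : Int) + 1 := by push_cast at hmx; omega
        have hsc : score (m - 1) = Mx f t := by rw [hmx']; omega
        -- Fst: split the range at m - 1
        unfold Fst
        rw [PySem.List.pyRange_one_append f (m - 1) t (by omega) (by omega), List.find?_append]
        have hnone : (PySem.List.pyRange f (m - 1) 1).find? (fun i => score i == Mx f t) = none := by
          rw [List.find?_eq_none]
          intro i hi
          rw [PySem.List.mem_pyRange_one] at hi
          simp only [beq_iff_eq]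
          intro heq
          -- score i = x+1 forces 2^(x+1) ∣ i+1, a multiple of k in [f+1, m-1]: contradicts minimality
          have h1 : 1 ≤ score i := by rw [heq, hmx']; omega
          have h2 := score_dvd i h1
          rw [heq, hmx'] at h2
          have h3 : ((x : Int) + 1).toNat = x + 1 := by omega
          rw [h3] at h2
          have h4 : m ≤ i + 1 := m_min (f + 1) k m (i + 1) hk hdm hmk h2 (by omega)
          omega
        rw [hnone]
        rw [PySem.List.pyRange_one_cons (by omega : m - 1 < t)]
        simp [hsc]
      · rw [if_neg hcond]
        -- no multiple of 2^(x+1) in [f+1, t], so Mx ≤ x; recurse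
        apply ih (by omega)
        by_contra hc
        have hmx' : Mx f t = (x : Int) + 1 := by push_cast at hmx; omega
        have hpos : 0 < Mx f t := by omega
        rcases mx_att f t hpos with ⟨i, hi, hsc⟩
        rw [PySem.List.mem_pyRange_one] at hi
        have h1 : 1 ≤ score i := by omega
        have h2 := score_dvd i h1
        rw [hsc, hmx'] at h2
        have h3 : ((x : Int) + 1).toNat = x + 1 := by omega
        rw [h3] at h2
        have h4 : m ≤ i + 1 := m_min (f + 1) k m (i + 1) hk hdm hmk h2 (by omega)
        omega

-- ===== VERDICT (by name: the statement is the Claim_ definition above) =====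
theorem find_high_score_spec : Claim_equal_find_high_score := by
  intro f t _
  show find_high_score f t = find_high_score_alt f t
  have hA : find_high_score f t = Fst f t := by
    unfold find_high_score
    rw [show (fun (st : Int × Int) i => if score i > st.1 then (score i, i) else st) = stepA from rfl,
        foldA]
  have hB : find_high_score_alt f t = Fst f t := by
    unfold find_high_score_alt
    rw [rng10_desc]
    exact bMain f t 10 (le_refl 10) (mx_le10 f t)
  rw [hA, hB]
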